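-- pv_equiv track=rewrite | github.com/Brok3n68/CodeWars | Python/[7 kyu] Check three and two.py | check_three_and_two
-- ===== SOURCE A (Python) =====
-- def check_three_and_two(array):
--
--     count_a, count_b, count_c = 0, 0, 0
--
--     for char in array:
--         if char == "a":
--             count_a += 1
--         elif char == "b":
--             count_b += 1
--         else:
--             count_c += 1
--
--     counts = [count_a, count_b, count_c]
--
--     return 3 in counts and 2 in counts
-- ===== SOURCE B (Python) =====
-- def check_three_and_two(array):
--     # Sort the categorised elements, then scan the runs: a run of length 3
--     # must exist and a run of length 2 must exist.
--     cats = sorted(x if x in ("a", "b") else "c" for x in array)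
--     seen3 = seen2 = False
--     i = 0
--     n = len(cats)
--     while i < n:
--         j = i + 1
--         while j < n and cats[j] == cats[i]:
--             j += 1
--         run = j - i
--         if run == 3:
--             seen3 = True
--         elif run == 2:
--             seen2 = True
--         i = j
--     return seen3 and seen2
-- ===== Notes on version B (the rewrite author's own statement) =====
-- stated objective: alternative
-- what changed: Instead of tallying three named counters in one branching pass, B maps every element to its category, sorts, and does a run-length scan over the sorted list, checking that a run of length 3 and a run of length 2 both occur.
import Mathlib
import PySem

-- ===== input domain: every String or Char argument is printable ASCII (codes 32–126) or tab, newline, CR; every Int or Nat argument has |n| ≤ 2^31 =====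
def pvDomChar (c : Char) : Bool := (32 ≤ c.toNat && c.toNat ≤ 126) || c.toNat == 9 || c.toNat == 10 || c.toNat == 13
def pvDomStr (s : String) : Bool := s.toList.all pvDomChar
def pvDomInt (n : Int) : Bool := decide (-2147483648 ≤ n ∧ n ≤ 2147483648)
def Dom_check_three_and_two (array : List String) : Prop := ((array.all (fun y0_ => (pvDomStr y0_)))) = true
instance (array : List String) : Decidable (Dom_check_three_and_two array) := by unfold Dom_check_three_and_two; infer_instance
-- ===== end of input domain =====

-- B replaces A's three-counter branching pass by sort-the-categories + run-length scan; objective: alternative.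

-- ===== PORT A =====
def check_three_and_two (array : List String) : Bool :=
  let st := array.foldl
    (fun (acc : Int × Int × Int) char =>
      if char == "a" then (acc.1 + 1, acc.2.1, acc.2.2)
      else if char == "b" then (acc.1, acc.2.1 + 1, acc.2.2)
      else (acc.1, acc.2.1, acc.2.2 + 1))
    (0, 0, 0)
  let counts : List Int := [st.1, st.2.1, st.2.2]
  counts.contains 3 && counts.contains 2

-- ===== PORT B =====
-- 'x if x in ("a","b") else "c"'
def pvCatOf (x : String) : String := if x == "a" || x == "b" then x else "c"

-- the outer while loop over the sorted list: the inner 'while cats[j]==cats[i]' walk is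
-- the equal prefix (takeWhile), 'i = j' drops it (dropWhile); run = j - i.
def pvRunScan (l : List String) (seen3 seen2 : Bool) : Bool :=
  match l with
  | [] => seen3 && seen2
  | x :: rest =>
      let run : Nat := 1 + (rest.takeWhile (fun y => y == x)).length
      pvRunScan (rest.dropWhile (fun y => y == x))
        (if run = 3 then true else seen3)
        (if run = 3 then seen2 else if run = 2 then true else seen2)
termination_by l.length
decreasing_by
  simp only [List.length_cons]
  exact Nat.lt_succ_of_le (List.length_dropWhile_le _ _)

def check_three_and_two_alt (array : List String) : Bool :=
  let cats := PySem.List.sorted (array.map pvCatOf) (fun x => x) false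
  pvRunScan cats false false

-- ===== PRECONDITION & SPEC =====
def Spec_check_three_and_two (array : List String) (out : Bool) : Prop := out = check_three_and_two_alt array
instance (array : List String) (out : Bool) : Decidable (Spec_check_three_and_two array out) := by unfold Spec_check_three_and_two; infer_instance

-- ===== CLAIM (what is proved, stated in full; the proofs are below) =====
def Claim_equal_check_three_and_two : Prop := ∀ (array : List String), Dom_check_three_and_two array → Spec_check_three_and_two array (check_three_and_two array)

-- ===== LEMMAS AND PROOFS =====

-- A's loop state after the fold, characterised in closed form.
theorem foldA_eq (array : List String) (a b c : Int) :
    array.foldl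
      (fun (acc : Int × Int × Int) char =>
        if char == "a" then (acc.1 + 1, acc.2.1, acc.2.2)
        else if char == "b" then (acc.1, acc.2.1 + 1, acc.2.2)
        else (acc.1, acc.2.1, acc.2.2 + 1))
      (a, b, c)
    = (a + array.count "a", b + array.count "b",
       c + ((array.length : Int) - array.count "a" - array.count "b")) := by
  induction array generalizing a b c with
  | nil => simp
  | cons x xs ih =>
    simp only [List.foldl_cons]
    by_cases hx : x = "a"
    · rw [if_pos (show (x == "a") = true by simp [hx]), ih]
      simp only [Prod.mk.injEq, List.count_cons, hx, List.length_cons, beq_iff_eq, if_pos]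
      push_cast
      refine ⟨by ring, by ring, by ring⟩
    · by_cases hy : x = "b"
      · rw [if_neg (show ¬ (x == "a") = true by simp [hx]),
          if_pos (show (x == "b") = true by simp [hy]), ih]
        simp only [Prod.mk.injEq, List.count_cons, List.length_cons, beq_iff_eq, hy]
        push_cast
        refine ⟨by ring, by ring, by ring⟩
      · rw [if_neg (show ¬ (x == "a") = true by simp [hx]),
          if_neg (show ¬ (x == "b") = true by simp [hy]), ih]
        simp only [Prod.mk.injEq, List.count_cons, List.length_cons, beq_iff_eq, hx, hy]
        push_cast
        refine ⟨by ring, by ring, by ring⟩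

theorem count_ab_le (l : List String) : l.count "a" + l.count "b" ≤ l.length := by
  induction l with
  | nil => simp
  | cons x xs ih =>
    simp only [List.count_cons, List.length_cons]
    by_cases hx : x = "a" <;> by_cases hy : x = "b" <;> simp_all <;> omega

-- pvCatOf hits "a"/"b" exactly on "a"/"b"
theorem catOf_a (x : String) : pvCatOf x = "a" ↔ x = "a" := by
  unfold pvCatOf; split_ifs with h <;> simp_all

theorem catOf_b (x : String) : pvCatOf x = "b" ↔ x = "b" := by
  unfold pvCatOf; split_ifs with h <;> simp_all

theorem cat_count_a (l : List String) : (l.map pvCatOf).count "a" = l.count "a" := by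
  induction l with
  | nil => rfl
  | cons x xs ih =>
    simp only [List.map_cons, List.count_cons, ih, beq_iff_eq]
    by_cases hx : x = "a"
    · subst hx; simp [pvCatOf]
    · have hc : pvCatOf x ≠ "a" := fun hh => hx ((catOf_a x).1 hh)
      rw [if_neg hc, if_neg hx]

theorem cat_count_b (l : List String) : (l.map pvCatOf).count "b" = l.count "b" := by
  induction l with
  | nil => rfl
  | cons x xs ih =>
    simp only [List.map_cons, List.count_cons, ih, beq_iff_eq]
    by_cases hx : x = "b"
    · subst hx; simp [pvCatOf]
    · have hc : pvCatOf x ≠ "b" := fun hh => hx ((catOf_b x).1 hh)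
      rw [if_neg hc, if_neg hx]

theorem cat_count_c (l : List String) :
    (l.map pvCatOf).count "c" = l.length - l.count "a" - l.count "b" := by
  induction l with
  | nil => rfl
  | cons x xs ih =>
    have hab := count_ab_le xs
    simp only [List.map_cons, List.count_cons, List.length_cons, beq_iff_eq]
    by_cases hx : x = "a"
    · subst hx
      simp only [pvCatOf]
      simp only [reduceIte]
      simp
      omega
    · by_cases hy : x = "b"
      · subst hy
        have ha : xs.count "a" ≤ xs.length := List.count_le_length
        simp only [pvCatOf]
        simp only [reduceIte]
        simp
        omega
      · have hc : pvCatOf x = "c" := by unfold pvCatOf; rw [if_neg (by simp [hx, hy])]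
        rw [hc]
        simp [hx, hy]
        omega

theorem cat_count_other (l : List String) (s : String)
    (h1 : s ≠ "a") (h2 : s ≠ "b") (h3 : s ≠ "c") : (l.map pvCatOf).count s = 0 := by
  rw [List.count_eq_zero]
  intro hmem
  obtain ⟨y, -, hEq⟩ := List.mem_map.1 hmem
  unfold pvCatOf at hEq
  split_ifs at hEq with h
  · simp only [Bool.or_eq_true, beq_iff_eq] at h
    rcases h with h' | h' <;> simp_all
  · exact h3 hEq.symm

-- the categorised list is a permutation of the block form
theorem perm_cats (l : List String) :
    (List.replicate (l.count "a") "a"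
      ++ List.replicate (l.count "b") "b"
      ++ List.replicate (l.length - l.count "a" - l.count "b") "c").Perm (l.map pvCatOf) := by
  rw [List.perm_iff_count]
  intro s
  simp only [List.count_append, List.count_replicate]
  by_cases h1 : s = "a"
  · subst h1; simp [cat_count_a]
  · by_cases h2 : s = "b"
    · subst h2; simp [cat_count_b]
    · by_cases h3 : s = "c"
      · subst h3; simp [cat_count_c]
      · simp [cat_count_other l s h1 h2 h3, Ne.symm h1, Ne.symm h2, Ne.symm h3]

theorem pairwise_blocks (a b c : Nat) :
    (List.replicate a "a" ++ List.replicate b "b" ++ List.replicate c "c").Pairwise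
      (fun x y : String => x ≤ y) := by
  refine (List.pairwise_append).2 ⟨(List.pairwise_append).2 ⟨?_, ?_, ?_⟩, ?_, ?_⟩
  · exact List.pairwise_replicate.2 (Or.inr (le_refl _))
  · exact List.pairwise_replicate.2 (Or.inr (le_refl _))
  · intro x hx y hy
    rw [List.eq_of_mem_replicate hx, List.eq_of_mem_replicate hy, String.le_iff_toList_le]; decide
  · exact List.pairwise_replicate.2 (Or.inr (le_refl _))
  · intro x hx y hy
    rw [List.eq_of_mem_replicate hy]
    rcases List.mem_append.1 hx with h | h <;>
      rw [List.eq_of_mem_replicate h, String.le_iff_toList_le] <;> decide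

-- sorted categories are exactly the block form
theorem sorted_cats_eq (array : List String) :
    PySem.List.sorted (array.map pvCatOf) (fun x => x) false
      = List.replicate (array.count "a") "a"
        ++ List.replicate (array.count "b") "b"
        ++ List.replicate (array.length - array.count "a" - array.count "b") "c" :=
  PySem.List.sorted_id_eq_of_perm_of_pairwise _ _ (perm_cats array) (pairwise_blocks _ _ _)

-- takeWhile/dropWhile over a uniform block followed by a block-free tail
theorem takeWhile_block (m : Nat) (x : String) (t : List String) (ht : ∀ y ∈ t, y ≠ x) :
    (List.replicate m x ++ t).takeWhile (fun y => y == x) = List.replicate m x := by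
  induction m with
  | zero =>
    cases t with
    | nil => rfl
    | cons y ys =>
      simp only [List.replicate_zero, List.nil_append, List.takeWhile_cons]
      rw [if_neg (by simp [ht y (by simp)])]
  | succ k ih =>
    simp only [List.replicate_succ, List.cons_append, List.takeWhile_cons, beq_self_eq_true,
      if_true, ih]

theorem dropWhile_block (m : Nat) (x : String) (t : List String) (ht : ∀ y ∈ t, y ≠ x) :
    (List.replicate m x ++ t).dropWhile (fun y => y == x) = t := by
  induction m with
  | zero =>
    cases t with
    | nil => rfl
    | cons y ys =>
      simp only [List.replicate_zero, List.nil_append, List.dropWhile_cons]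
      rw [if_neg (by simp [ht y (by simp)])]
  | succ k ih =>
    simp only [List.replicate_succ, List.cons_append, List.dropWhile_cons, beq_self_eq_true,
      if_true, ih]

-- one run step: a block of n copies of x followed by a tail free of x
theorem pvRunScan_block (n : Nat) (x : String) (t : List String) (s3 s2 : Bool)
    (ht : ∀ y ∈ t, y ≠ x) :
    pvRunScan (List.replicate n x ++ t) s3 s2
      = pvRunScan t (if n = 3 then true else s3)
          (if n = 3 then s2 else if n = 2 then true else s2) := by
  cases n with
  | zero => simp
  | succ m =>
    rw [List.replicate_succ, List.cons_append, pvRunScan]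
    rw [takeWhile_block m x t ht, dropWhile_block m x t ht]
    simp only [List.length_replicate]
    norm_num [Nat.add_comm]

-- ===== VERDICT (by name: the statement is the Claim_ definition above) =====
theorem check_three_and_two_spec : Claim_equal_check_three_and_two := by
  intro array _
  unfold Spec_check_three_and_two check_three_and_two check_three_and_two_alt
  simp only [foldA_eq, sorted_cats_eq, zero_add, List.append_assoc]
  rw [pvRunScan_block _ "a" _ _ _ (by
        intro y hy
        rcases List.mem_append.1 hy with h | h <;> simp [List.eq_of_mem_replicate h]),
      pvRunScan_block _ "b" _ _ _ (fun y hy => by simp [List.eq_of_mem_replicate hy]),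
      show (List.replicate (array.length - List.count "a" array - List.count "b" array) "c")
        = List.replicate (array.length - List.count "a" array - List.count "b" array) "c"
          ++ ([] : List String) from (List.append_nil _).symm,
      pvRunScan_block _ "c" _ _ _ (by simp)]
  have hle := count_ab_le array
  rw [Bool.eq_iff_iff]
  simp only [pvRunScan]
  split_ifs <;> simp_all [List.contains_eq_mem] <;> omega
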